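-- pv_equiv track=rewrite | github.com/Gymnette/ProjetL3 | TACHES/Appli/splines_de_lissage.py | presence_intervalle_vide
-- ===== SOURCE A (Python) =====
-- def presence_intervalle_vide(xi, uk):
--     for i, a in enumerate(xi):
--         if i != len(xi)-1:
--             b = xi[i+1]
--             non_vide = False
--             for p in uk:
--                 if a <= p <= b:
--                     non_vide = True
--             if not non_vide:
--                 return True
--     return False
-- ===== SOURCE B (Python) =====
-- def presence_intervalle_vide(xi, uk):
--     s = sorted(uk)
--     n = len(s)
--     for a, b in zip(xi, xi[1:]):
--         lo, hi = 0, n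
--         while lo < hi:
--             mid = (lo + hi) // 2
--             if s[mid] < a:
--                 lo = mid + 1
--             else:
--                 hi = mid
--         if lo == n or s[lo] > b:
--             return True
--     return False
-- ===== Notes on version B (the rewrite author's own statement) =====
-- stated objective: faster
-- what changed: Instead of scanning all of uk for every consecutive xi pair, B sorts uk once and binary-searches each interval [a,b] for the first element >= a, so the per-interval work drops from O(m) to O(log m).
import Mathlib
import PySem

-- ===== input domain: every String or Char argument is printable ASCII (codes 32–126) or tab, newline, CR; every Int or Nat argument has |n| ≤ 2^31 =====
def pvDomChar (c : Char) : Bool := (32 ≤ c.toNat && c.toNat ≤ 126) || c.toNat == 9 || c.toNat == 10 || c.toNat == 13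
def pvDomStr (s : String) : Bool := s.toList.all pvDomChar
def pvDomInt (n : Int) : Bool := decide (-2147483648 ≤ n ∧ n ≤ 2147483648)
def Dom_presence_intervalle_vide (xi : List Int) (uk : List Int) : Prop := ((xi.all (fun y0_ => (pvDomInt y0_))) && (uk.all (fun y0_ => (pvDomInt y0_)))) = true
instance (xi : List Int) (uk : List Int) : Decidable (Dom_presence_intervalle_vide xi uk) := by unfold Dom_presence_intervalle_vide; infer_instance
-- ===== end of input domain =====

-- B replaces A's inner scan of uk by one sort of uk plus a binary search per consecutive
-- xi pair (O(n*m) → O((n+m) log m)); return values proved equal on all inputs.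

-- ===== PORT A =====
-- inner 'for p in uk' loop of A, setting non_vide
def pvInnerA (uk : List Int) (a b : Int) : Bool :=
  uk.foldl (fun nv p => if a ≤ p ∧ p ≤ b then true else nv) false

-- outer 'for i, a in enumerate(xi)' loop with early return
def pvLoopA (xi uk : List Int) : List (Int × Int) → Bool
  | [] => false
  | (i, a) :: rest =>
      if i ≠ (xi.length : Int) - 1 then
        match PySem.List.pyGet? xi (i + 1) with
        | some b => if pvInnerA uk a b then pvLoopA xi uk rest else true
        | none => pvLoopA xi uk rest      -- unreachable: i+1 is in range when i ≠ len-1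
      else pvLoopA xi uk rest

def presence_intervalle_vide (xi : List Int) (uk : List Int) : Bool :=
  pvLoopA xi uk (PySem.List.enumerate xi)

-- ===== PORT B =====
-- hand-written bisect_left 'while lo < hi' loop of Source B
def pvBisect (s : List Int) (a : Int) (lo hi : Nat) : Nat :=
  if h : lo < hi then
    let mid := (lo + hi) / 2
    if s.getD mid 0 < a then pvBisect s a (mid + 1) hi else pvBisect s a lo mid
  else lo
termination_by hi - lo
decreasing_by all_goals omega

-- 'for a, b in zip(xi, xi[1:])' loop of Source B with early return
def pvLoopB (s : List Int) : List (Int × Int) → Bool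
  | [] => false
  | (a, b) :: rest =>
      let lo := pvBisect s a 0 s.length
      if lo = s.length ∨ b < s.getD lo 0 then true else pvLoopB s rest

def presence_intervalle_vide_alt (xi : List Int) (uk : List Int) : Bool :=
  let s := PySem.List.sorted uk (fun x => x) false
  pvLoopB s (xi.zip (PySem.List.slice xi (some 1) none))

-- ===== PRECONDITION & SPEC =====
def Spec_presence_intervalle_vide (xi : List Int) (uk : List Int) (out : Bool) : Prop := out = presence_intervalle_vide_alt xi uk
instance (xi : List Int) (uk : List Int) (out : Bool) : Decidable (Spec_presence_intervalle_vide xi uk out) := by unfold Spec_presence_intervalle_vide; infer_instance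

-- ===== CLAIM (what is proved, stated in full; the proofs are below) =====
def Claim_equal_presence_intervalle_vide : Prop := ∀ (xi : List Int) (uk : List Int), Dom_presence_intervalle_vide xi uk → Spec_presence_intervalle_vide xi uk (presence_intervalle_vide xi uk)

-- ===== LEMMAS AND PROOFS =====

-- the common reference predicate: interval [a,b] contains no point of l
def pvHasPt (l : List Int) (a b : Int) : Bool :=
  l.any (fun p => decide (a ≤ p ∧ p ≤ b))

lemma pvInnerA_eq (uk : List Int) (a b : Int) : pvInnerA uk a b = pvHasPt uk a b := by
  have h := PySem.List.foldl_if_true_eq (fun p => decide (a ≤ p ∧ p ≤ b)) uk false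
  simp only [decide_eq_true_eq] at h
  simpa [pvInnerA, pvHasPt] using h

lemma pvLoopA_eq (xi uk : List Int) :
    ∀ (n k : Nat), k + n = xi.length →
      pvLoopA xi uk (PySem.List.enumerate (xi.drop k) k) =
        ((xi.drop k).zip (xi.drop (k + 1))).any (fun ab => !(pvHasPt uk ab.1 ab.2)) := by
  intro n
  induction n with
  | zero =>
      intro k hk
      simp [List.drop_eq_nil_of_le (by omega : xi.length ≤ k), pvLoopA]
  | succ n ih =>
      intro k hk
      have hklt : k < xi.length := by omega
      rw [List.drop_eq_getElem_cons hklt, PySem.List.enumerate_cons, pvLoopA]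
      by_cases hlast : (k : Int) = (xi.length : Int) - 1
      · -- last index: A skips; the zip is empty since drop (k+1) = []
        have hk1 : xi.length ≤ k + 1 := by omega
        have hnil : xi.drop (k + 1) = [] := List.drop_eq_nil_of_le hk1
        simp only [hlast, ne_eq, not_true_eq_false, if_false]
        rw [hnil, PySem.List.enumerate, pvLoopA]
        simp
      · have hk1 : k + 1 < xi.length := by
          rcases Nat.lt_or_ge (k+1) xi.length with h | h
          · exact h
          · exact absurd (by omega) hlast
        have hget : PySem.List.pyGet? xi ((k : Int) + 1) = some xi[k+1] := by
          have hcast : ((k : Int) + 1) = ((k + 1 : Nat) : Int) := by push_cast; ring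
          rw [hcast, PySem.List.pyGet?_natCast, List.getElem?_eq_getElem hk1]
        simp only [hlast, ne_eq, not_false_eq_true, if_true, hget]
        have hrec := ih (k + 1) (by omega)
        rw [List.drop_eq_getElem_cons hk1] at hrec
        push_cast at hrec
        rw [List.drop_eq_getElem_cons hk1]
        simp only [List.zip_cons_cons, List.any_cons, pvInnerA_eq]
        by_cases hin : pvHasPt uk xi[k] xi[k+1] = true
        · simp only [hin, if_true, Bool.not_true, Bool.false_or]
          rw [hrec]
        · simp [hin]

lemma pvA_eq (xi uk : List Int) :
    presence_intervalle_vide xi uk =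
      (xi.zip (xi.drop 1)).any (fun ab => !(pvHasPt uk ab.1 ab.2)) := by
  have h := pvLoopA_eq xi uk xi.length 0 (by omega)
  simpa [presence_intervalle_vide] using h

lemma pvSorted_getD_mono (s : List Int) (hs : s.Pairwise (· ≤ ·)) (i j : Nat)
    (hij : i ≤ j) (hj : j < s.length) : s.getD i 0 ≤ s.getD j 0 := by
  rcases Nat.lt_or_ge i j with h | h
  · rw [List.getD_eq_getElem s 0 (by omega), List.getD_eq_getElem s 0 hj]
    exact List.pairwise_iff_getElem.mp hs i j (by omega) hj h
  · have : i = j := by omega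
    simp [this]

lemma pvBisect_inv (s : List Int) (a : Int) (hs : s.Pairwise (· ≤ ·)) :
    ∀ (d lo hi : Nat), hi - lo ≤ d → lo ≤ hi → hi ≤ s.length →
      (∀ k, k < lo → s.getD k 0 < a) →
      (∀ k, hi ≤ k → k < s.length → a ≤ s.getD k 0) →
      lo ≤ pvBisect s a lo hi ∧ pvBisect s a lo hi ≤ hi ∧
      (∀ k, k < pvBisect s a lo hi → s.getD k 0 < a) ∧
      (∀ k, pvBisect s a lo hi ≤ k → k < s.length → a ≤ s.getD k 0) := by
  intro d
  induction d with
  | zero =>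
      intro lo hi hd hlh hhl hlow hhigh
      have : ¬ lo < hi := by omega
      rw [pvBisect, dif_neg this]
      exact ⟨le_refl _, hlh, hlow, fun k hk => hhigh k (by omega)⟩
  | succ d ih =>
      intro lo hi hd hlh hhl hlow hhigh
      rw [pvBisect]
      by_cases h : lo < hi
      · rw [dif_pos h]
        have hmid1 : lo ≤ (lo + hi) / 2 := by omega
        have hmid2 : (lo + hi) / 2 < hi := by omega
        by_cases hc : s.getD ((lo + hi) / 2) 0 < a
        · simp only [hc, if_true]
          have hlow' : ∀ k, k < (lo + hi) / 2 + 1 → s.getD k 0 < a := by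
            intro k hk
            exact lt_of_le_of_lt (pvSorted_getD_mono s hs k ((lo + hi) / 2) (by omega) (by omega)) hc
          have := ih ((lo + hi) / 2 + 1) hi (by omega) (by omega) hhl hlow' hhigh
          exact ⟨by omega, this.2.1, this.2.2⟩
        · simp only [hc, if_false]
          push Not at hc
          have hhigh' : ∀ k, (lo + hi) / 2 ≤ k → k < s.length → a ≤ s.getD k 0 := by
            intro k hk hkl
            exact le_trans hc (pvSorted_getD_mono s hs ((lo + hi) / 2) k hk hkl)
          have := ih lo ((lo + hi) / 2) (by omega) (by omega) (by omega) hlow hhigh'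
          exact ⟨this.1, by omega, this.2.2⟩
      · rw [dif_neg h]
        exact ⟨le_refl _, hlh, hlow, fun k hk => hhigh k (by omega)⟩

lemma pvBisect_cond (s : List Int) (hs : s.Pairwise (· ≤ ·)) (a b : Int) :
    (pvBisect s a 0 s.length = s.length ∨ b < s.getD (pvBisect s a 0 s.length) 0) ↔
      pvHasPt s a b = false := by
  obtain ⟨-, hle, hlow, hhigh⟩ :=
    pvBisect_inv s a hs s.length 0 s.length (by omega) (by omega) (le_refl _)
      (by intro k hk; omega) (by intro k hk hk2; omega)
  set j := pvBisect s a 0 s.length with hj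
  constructor
  · intro hcond
    simp only [pvHasPt, List.any_eq_false, decide_eq_true_eq]
    rintro p hp ⟨hap, hpb⟩
    obtain ⟨k, hk, hpk⟩ := List.mem_iff_getElem.mp hp
    have hgd : s.getD k 0 = p := by rw [List.getD_eq_getElem s 0 hk, hpk]
    have hjk : j ≤ k := by
      by_contra hlt
      exact absurd hap (by rw [← hgd] at *; exact not_le.mpr (hlow k (by omega)))
    rcases hcond with hlen | hgt
    · omega
    · have : s.getD j 0 ≤ p := by
        rw [← hgd]; exact pvSorted_getD_mono s hs j k hjk hk
      omega
  · intro hnone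
    by_contra hcond
    push Not at hcond
    obtain ⟨hjlen, hjb⟩ := hcond
    have hjlt : j < s.length := by omega
    have hmem : s.getD j 0 ∈ s := by
      rw [List.getD_eq_getElem s 0 hjlt]; exact List.getElem_mem hjlt
    have haj : a ≤ s.getD j 0 := hhigh j (le_refl _) hjlt
    have : pvHasPt s a b = true := by
      simp only [pvHasPt, List.any_eq_true, decide_eq_true_eq]
      exact ⟨s.getD j 0, hmem, haj, hjb⟩
    rw [hnone] at this
    exact Bool.false_ne_true this

lemma pvLoopB_eq (s : List Int) (hs : s.Pairwise (· ≤ ·)) (pairs : List (Int × Int)) :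
    pvLoopB s pairs = pairs.any (fun ab => !(pvHasPt s ab.1 ab.2)) := by
  induction pairs with
  | nil => simp [pvLoopB]
  | cons ab rest ih =>
      obtain ⟨a, b⟩ := ab
      show (if pvBisect s a 0 s.length = s.length ∨ b < s.getD (pvBisect s a 0 s.length) 0
              then true else pvLoopB s rest) = _
      by_cases hc : pvBisect s a 0 s.length = s.length ∨ b < s.getD (pvBisect s a 0 s.length) 0
      · rw [if_pos hc]
        have := (pvBisect_cond s hs a b).mp hc
        simp [this]
      · rw [if_neg hc]
        have : ¬ pvHasPt s a b = false := fun h => hc ((pvBisect_cond s hs a b).mpr h)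
        have hT : pvHasPt s a b = true := by
          cases h : pvHasPt s a b
          · exact absurd h this
          · rfl
        simp [ih, hT]

lemma pvB_eq (xi uk : List Int) :
    presence_intervalle_vide_alt xi uk =
      (xi.zip (xi.drop 1)).any (fun ab => !(pvHasPt uk ab.1 ab.2)) := by
  show pvLoopB (PySem.List.sorted uk (fun x => x) false)
        (xi.zip (PySem.List.slice xi (some 1) none)) = _
  rw [PySem.List.slice_from_one, ← List.drop_one]
  have hs : (PySem.List.sorted uk (fun x => x) false).Pairwise (· ≤ ·) := by
    simpa using PySem.List.sorted_pairwise uk (fun x => x)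
  rw [pvLoopB_eq _ hs]
  have hperm : (PySem.List.sorted uk (fun x => x) false).Perm uk :=
    PySem.List.sorted_perm uk (fun x => x) false
  simp only [pvHasPt, hperm.any_eq]

-- ===== VERDICT (by name: the statement is the Claim_ definition above) =====
theorem presence_intervalle_vide_spec : Claim_equal_presence_intervalle_vide := by
  unfold Claim_equal_presence_intervalle_vide
  intro xi uk _
  unfold Spec_presence_intervalle_vide
  rw [pvA_eq, pvB_eq]
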